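-- pv_equiv track=rewrite | github.com/pypi-data/pypi-mirror-46 | packages/Tempus.py/Tempus.py-1.1.0-py3-none-any.whl/tempus/util.py | years_to_days
-- ===== SOURCE A (Python) =====
-- def sign(n):
--     return int(abs(n)/n) if n != 0 else 1
--
-- def is_leap_year(year):
--     return year%4 == 0 and year%100 != 0 or year%400 == 0
--
-- def years_to_days(current_year, years):
--     days = 0
--     year = int(current_year)
--
--     for _ in range(abs(years)):
--         year += sign(years) if sign(years) < 0 else 0
--         days += 366 if is_leap_year(year) else 365
--         year += sign(years) if sign(years) > 0 else 0
--
--     return days * sign(years)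
-- ===== SOURCE B (Python) =====
-- def years_to_days(current_year, years):
--     # Closed form: leap years in [lo, hi] counted via L(y) = y//4 - y//100 + y//400.
--     def L(y):
--         return y // 4 - y // 100 + y // 400
--     if years == 0:
--         return 0
--     cy = int(current_year)
--     if years > 0:
--         lo, hi, s = cy, cy + years - 1, 1
--     else:
--         lo, hi, s = cy + years, cy - 1, -1
--     return s * (365 * abs(years) + L(hi) - L(lo - 1))
-- ===== Notes on version B (the rewrite author's own statement) =====
-- stated objective: faster
-- what changed: Replaces the per-year loop with a closed-form leap-year count L(y)=y//4-y//100+y//400 over the spanned year interval.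
import Mathlib
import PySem

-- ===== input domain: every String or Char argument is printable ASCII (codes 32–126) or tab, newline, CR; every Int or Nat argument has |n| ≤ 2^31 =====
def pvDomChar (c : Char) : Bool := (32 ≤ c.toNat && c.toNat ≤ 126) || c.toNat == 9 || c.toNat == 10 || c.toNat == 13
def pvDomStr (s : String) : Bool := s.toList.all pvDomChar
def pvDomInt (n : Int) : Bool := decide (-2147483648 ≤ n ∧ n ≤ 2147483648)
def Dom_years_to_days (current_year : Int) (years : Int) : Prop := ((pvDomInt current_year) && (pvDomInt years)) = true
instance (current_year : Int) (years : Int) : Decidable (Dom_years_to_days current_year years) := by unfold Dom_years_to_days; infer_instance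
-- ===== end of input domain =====

-- B replaces A's per-year loop by a closed-form leap-year count over the spanned interval (O(1) instead of O(|years|)).

-- ===== PORT A =====
-- int(abs(n)/n): Python float division is exact here (the quotient is exactly ±1.0),
-- so floor division is an exact port of int(abs(n)/n) for nonzero integer n.
def pvSign (n : Int) : Int :=
  if n ≠ 0 then PySem.Int.floordiv |n| n else 1

def pvIsLeapYear (year : Int) : Bool :=
  (PySem.Int.mod year 4 == 0 && !(PySem.Int.mod year 100 == 0)) || PySem.Int.mod year 400 == 0

-- loop body of A's `for _ in range(abs(years))`
def pvBody (years : Int) (st : Int × Int) (_ : Int) : Int × Int :=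
  let year := st.2 + (if pvSign years < 0 then pvSign years else 0)
  let days := st.1 + (if pvIsLeapYear year then 366 else 365)
  let year := year + (if pvSign years > 0 then pvSign years else 0)
  (days, year)

def years_to_days (current_year : Int) (years : Int) : Int :=
  ((PySem.List.pyRange 0 |years| 1).foldl (pvBody years) (0, current_year)).1 * pvSign years

-- ===== PORT B =====
-- L(y) = y//4 - y//100 + y//400
def pvLeapsUpTo (y : Int) : Int :=
  PySem.Int.floordiv y 4 - PySem.Int.floordiv y 100 + PySem.Int.floordiv y 400

def years_to_days_alt (current_year : Int) (years : Int) : Int :=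
  if years = 0 then 0
  else if years > 0 then
    -- lo = cy, hi = cy + years - 1, s = 1
    1 * (365 * |years| + (pvLeapsUpTo (current_year + years - 1) - pvLeapsUpTo (current_year - 1)))
  else
    -- lo = cy + years, hi = cy - 1, s = -1
    (-1) * (365 * |years| + (pvLeapsUpTo (current_year - 1) - pvLeapsUpTo (current_year + years - 1)))

-- ===== PRECONDITION & SPEC =====
def Spec_years_to_days (current_year : Int) (years : Int) (out : Int) : Prop := out = years_to_days_alt current_year years
instance (current_year : Int) (years : Int) (out : Int) : Decidable (Spec_years_to_days current_year years out) := by unfold Spec_years_to_days; infer_instance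

-- ===== CLAIM (what is proved, stated in full; the proofs are below) =====
def Claim_equal_years_to_days : Prop := ∀ (current_year : Int) (years : Int), Dom_years_to_days current_year years → Spec_years_to_days current_year years (years_to_days current_year years)

-- ===== LEMMAS AND PROOFS =====

-- loop body for years > 0 (sign = 1): count the year, then step forward
def pvStepPos (st : Int × Int) : Int × Int :=
  (st.1 + (if pvIsLeapYear st.2 then 366 else 365), st.2 + 1)

-- loop body for years < 0 (sign = -1): step back, then count the year
def pvStepNeg (st : Int × Int) : Int × Int :=
  (st.1 + (if pvIsLeapYear (st.2 + -1) then 366 else 365), st.2 + -1)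

lemma pvFoldIter {α σ : Type} (f : σ → α → σ) (g : σ → σ) (h : ∀ s x, f s x = g s) :
    ∀ (l : List α) (init : σ), l.foldl f init = g^[l.length] init := by
  intro l
  induction l with
  | nil => intro init; rfl
  | cons a t ih =>
      intro init
      simp only [List.foldl_cons, List.length_cons, h, ih, Function.iterate_succ_apply]

lemma pvLeapStep (z : Int) :
    pvLeapsUpTo z - pvLeapsUpTo (z - 1) = if pvIsLeapYear z then 1 else 0 := by
  unfold pvLeapsUpTo pvIsLeapYear
  rw [PySem.Int.floordiv_eq_ediv_of_pos (by norm_num : (0:Int) < 4),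
      PySem.Int.floordiv_eq_ediv_of_pos (by norm_num : (0:Int) < 100),
      PySem.Int.floordiv_eq_ediv_of_pos (by norm_num : (0:Int) < 400),
      PySem.Int.floordiv_eq_ediv_of_pos (by norm_num : (0:Int) < 4),
      PySem.Int.floordiv_eq_ediv_of_pos (by norm_num : (0:Int) < 100),
      PySem.Int.floordiv_eq_ediv_of_pos (by norm_num : (0:Int) < 400),
      PySem.Int.mod_eq_emod_of_pos (by norm_num : (0:Int) < 4),
      PySem.Int.mod_eq_emod_of_pos (by norm_num : (0:Int) < 100),
      PySem.Int.mod_eq_emod_of_pos (by norm_num : (0:Int) < 400)]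
  simp only [Bool.or_eq_true, Bool.and_eq_true, beq_iff_eq, Bool.not_eq_true',
    beq_eq_false_iff_ne, ne_eq]
  split_ifs with h <;> omega

lemma pvPosIter (y : Int) (m : Nat) :
    pvStepPos^[m] (0, y) =
      (365 * (m : Int) + (pvLeapsUpTo (y + (m : Int) - 1) - pvLeapsUpTo (y - 1)), y + (m : Int)) := by
  induction m with
  | zero => simp
  | succ k ih =>
      rw [Function.iterate_succ_apply', ih]
      unfold pvStepPos
      have h := pvLeapStep (y + (k : Int))
      have hz : y + (k : Int) - 1 = y + (k : Int) - 1 := rfl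
      push_cast
      have hL : pvLeapsUpTo (y + ((k : Int) + 1) - 1) = pvLeapsUpTo (y + (k : Int)) :=
        congrArg _ (by ring)
      rw [hL]
      simp only [Prod.mk.injEq]
      constructor
      · split_ifs at h ⊢ <;> omega
      · ring

lemma pvNegIter (y : Int) (m : Nat) :
    pvStepNeg^[m] (0, y) =
      (365 * (m : Int) + (pvLeapsUpTo (y - 1) - pvLeapsUpTo (y - (m : Int) - 1)), y - (m : Int)) := by
  induction m with
  | zero => simp
  | succ k ih =>
      rw [Function.iterate_succ_apply', ih]
      unfold pvStepNeg
      have e : y - (k : Int) + -1 = y - (k : Int) - 1 := by ring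
      rw [e]
      have h := pvLeapStep (y - (k : Int) - 1)
      push_cast
      have hL : pvLeapsUpTo (y - ((k : Int) + 1) - 1) = pvLeapsUpTo (y - (k : Int) - 1 - 1) :=
        congrArg _ (by ring)
      have hsnd : y - ((k : Int) + 1) = y - (k : Int) - 1 := by ring
      rw [hL, hsnd]
      simp only [Prod.mk.injEq]
      constructor
      · split_ifs at h ⊢ <;> omega
      · trivial

lemma pvSign_pos {n : Int} (h : 0 < n) : pvSign n = 1 := by
  unfold pvSign
  rw [if_pos h.ne', abs_of_pos h,
      PySem.Int.floordiv_eq_ediv_of_pos h, Int.ediv_self h.ne']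

lemma pvSign_neg {n : Int} (h : n < 0) : pvSign n = -1 := by
  unfold pvSign
  rw [if_pos h.ne, abs_of_neg h]
  have h1 : PySem.Int.floordiv (-n) n = PySem.Int.floordiv n (-n) := by
    have h2 := PySem.Int.floordiv_neg_neg n (-n)
    simpa using h2
  rw [h1, PySem.Int.floordiv_eq_ediv_of_pos (by omega : (0:Int) < -n),
      Int.ediv_neg, Int.ediv_self h.ne]

-- ===== VERDICT (by name: the statement is the Claim_ definition above) =====
theorem years_to_days_spec : Claim_equal_years_to_days := by
  intro cy years _
  unfold Spec_years_to_days years_to_days years_to_days_alt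
  rcases lt_trichotomy years 0 with hneg | h0 | hpos
  · -- years < 0
    have hs := pvSign_neg hneg
    have hb : ∀ (s : Int × Int) (x : Int), pvBody years s x = pvStepNeg s := by
      intro s x; simp [pvBody, pvStepNeg, hs]
    rw [pvFoldIter (pvBody years) pvStepNeg hb, PySem.List.length_pyRange_one,
        abs_of_neg hneg, hs]
    have hlen : (-years - 0).toNat = (-years).toNat := by norm_num
    rw [hlen, pvNegIter]
    have hn : ((-years).toNat : Int) = -years := Int.toNat_of_nonneg (by omega)
    rw [hn]
    rw [if_neg hneg.ne, if_neg (by omega : ¬ years > 0)]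
    have hL : pvLeapsUpTo (cy - -years - 1) = pvLeapsUpTo (cy + years - 1) :=
      congrArg _ (by ring)
    rw [hL]
    ring
  · -- years = 0
    subst h0
    rw [show PySem.List.pyRange 0 |(0:Int)| 1 = [] from by
      rw [abs_zero]; exact PySem.List.pyRange_one_eq_nil le_rfl]
    simp [pvSign]
  · -- years > 0
    have hs := pvSign_pos hpos
    have hb : ∀ (s : Int × Int) (x : Int), pvBody years s x = pvStepPos s := by
      intro s x; simp [pvBody, pvStepPos, hs]
    rw [pvFoldIter (pvBody years) pvStepPos hb, PySem.List.length_pyRange_one,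
        abs_of_pos hpos, hs]
    have hlen : (years - 0).toNat = years.toNat := by norm_num
    rw [hlen, pvPosIter]
    have hn : (years.toNat : Int) = years := Int.toNat_of_nonneg hpos.le
    rw [hn]
    rw [if_neg hpos.ne', if_pos hpos]
    ring
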